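-- pv_equiv track=rewrite | github.com/SaudAlhafith/absher-visa-agent | python-agents/src/agents/pdf_generator/agent.py | _categorize_requirements
-- ===== SOURCE A (Python) =====
-- def _categorize_requirements(
--
--     requirements: list,
-- ) -> dict[str, list]:
--     """Group requirements by category."""
--     category_names = {
--         "personal_documents": "المستندات الشخصية | Personal Documents",
--         "financial": "المستندات المالية | Financial Documents",
--         "travel": "وثائق السفر | Travel Documents",
--         "accommodation": "الإقامة | Accommodation",
--         "employment": "التوظيف | Employment",
--         "application": "نماذج الطلب | Application Forms",
--         "other": "أخرى | Other",
--     }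
--
--     categories: dict[str, list] = {}
--     for req in requirements:
--         cat_key = req.get("category", "other")
--         cat_name = category_names.get(cat_key, category_names["other"])
--
--         if cat_name not in categories:
--             categories[cat_name] = []
--         categories[cat_name].append(req)
--
--     return categories
-- ===== SOURCE B (Python) =====
-- def _categorize_requirements(
--     requirements: list,
-- ) -> dict[str, list]:
--     """Group requirements by category (two-pass: name each req, then one filter pass per distinct name)."""
--     category_names = {
--         "personal_documents": "المستندات الشخصية | Personal Documents",
--         "financial": "المستندات المالية | Financial Documents",
--         "travel": "وثائق السفر | Travel Documents",
--         "accommodation": "الإقامة | Accommodation",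
--         "employment": "التوظيف | Employment",
--         "application": "نماذج الطلب | Application Forms",
--         "other": "أخرى | Other",
--     }
--     names = [
--         category_names.get(req.get("category", "other"), category_names["other"])
--         for req in requirements
--     ]
--     return {
--         name: [req for req, n in zip(requirements, names) if n == name]
--         for name in dict.fromkeys(names)
--     }
-- ===== Notes on version B (the rewrite author's own statement) =====
-- stated objective: alternative
-- what changed: Replaces the single bucketing loop over a mutable dict with a two-phase plan: map every requirement to its category name, then build the result dict by one filter pass per distinct name (dict.fromkeys order).
import Mathlib
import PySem

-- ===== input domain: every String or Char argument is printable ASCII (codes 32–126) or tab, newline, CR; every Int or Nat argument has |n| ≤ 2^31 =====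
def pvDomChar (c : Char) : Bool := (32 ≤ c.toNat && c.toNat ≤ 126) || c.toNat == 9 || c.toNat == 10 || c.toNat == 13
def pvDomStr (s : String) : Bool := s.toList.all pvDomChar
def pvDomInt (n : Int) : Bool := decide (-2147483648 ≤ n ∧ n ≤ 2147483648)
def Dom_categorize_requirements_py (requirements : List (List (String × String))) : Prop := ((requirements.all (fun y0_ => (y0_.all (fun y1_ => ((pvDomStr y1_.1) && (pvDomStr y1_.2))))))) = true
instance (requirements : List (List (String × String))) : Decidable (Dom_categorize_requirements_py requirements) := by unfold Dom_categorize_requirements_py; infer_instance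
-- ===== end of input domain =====

-- ===== PORT A =====
-- B changes structure only: a map + per-distinct-name filter passes instead of A's single bucketing loop; same result.
-- shared constant: the literal category-name table of the Python source
def pvCatNames : PySem.Dict String String := PySem.Dict.mk [
  ("personal_documents", "المستندات الشخصية | Personal Documents"),
  ("financial", "المستندات المالية | Financial Documents"),
  ("travel", "وثائق السفر | Travel Documents"),
  ("accommodation", "الإقامة | Accommodation"),
  ("employment", "التوظيف | Employment"),
  ("application", "نماذج الطلب | Application Forms"),
  ("other", "أخرى | Other")]

-- cat_name = category_names.get(req.get("category", "other"), category_names["other"]);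
-- "other" is a key of the literal table, so the [] lookup never raises and equals the getD below
def pvCatName (req : List (String × String)) : String :=
  PySem.Dict.getD pvCatNames ((PySem.Dict.mk req).getD "category" "other")
    (PySem.Dict.getD pvCatNames "other" "")

def categorize_requirements_py (requirements : List (List (String × String))) : List (String × List (List (String × String))) :=
  (requirements.foldl (fun categories req =>
      let cat_name := pvCatName req
      let categories := if categories.contains cat_name then categories
                        else categories.insert cat_name []
      categories.modify cat_name [] (fun l => l ++ [req]))
    PySem.Dict.empty).items

-- ===== PORT B =====
def categorize_requirements_py_alt (requirements : List (List (String × String))) : List (String × List (List (String × String))) :=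
  let names := requirements.map pvCatName
  (PySem.List.dedup names).map (fun name =>
    (name, ((requirements.zip names).filter (fun p => p.2 == name)).map Prod.fst))

-- ===== PRECONDITION & SPEC =====
def Spec_categorize_requirements_py (requirements : List (List (String × String))) (out : List (String × List (List (String × String)))) : Prop := out = categorize_requirements_py_alt requirements
instance (requirements : List (List (String × String))) (out : List (String × List (List (String × String)))) : Decidable (Spec_categorize_requirements_py requirements out) := by unfold Spec_categorize_requirements_py; infer_instance

-- ===== CLAIM (what is proved, stated in full; the proofs are below) =====
def Claim_equal_categorize_requirements_py : Prop := ∀ (requirements : List (List (String × String))), Dom_categorize_requirements_py requirements → Spec_categorize_requirements_py requirements (categorize_requirements_py requirements)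

-- ===== LEMMAS AND PROOFS =====

-- A's "insert [] if absent, then append" is one modify-with-default step
lemma stepA_eq (d : PySem.Dict String (List (List (String × String)))) (k : String)
    (r : List (String × String)) :
    (if d.contains k then d else d.insert k []).modify k [] (fun l => l ++ [r])
      = d.modify k [] (fun l => l ++ [r]) := by
  by_cases h : d.contains k
  · simp [h]
  · have h' : d.contains k = false := by simpa using h
    simp [h', PySem.Dict.modify, PySem.Dict.getD_insert_self, PySem.Dict.insert_insert_self,
      PySem.Dict.getD_of_not_contains]

-- B's zip-filter-map collects exactly the requirements whose name is n
lemma zip_filter_eq (l : List (List (String × String))) (n : String) :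
    (((l.zip (l.map pvCatName)).filter (fun p => p.2 == n)).map Prod.fst)
      = ((l.map (fun r => (pvCatName r, r))).filter (fun p => p.1 == n)).map (fun p => p.2) := by
  induction l with
  | nil => rfl
  | cons a t ih =>
    by_cases h : pvCatName a = n <;> simp [h, ih]

-- ===== VERDICT (by name: the statement is the Claim_ definition above) =====
theorem categorize_requirements_py_spec : Claim_equal_categorize_requirements_py := by
  intro requirements _
  unfold Spec_categorize_requirements_py categorize_requirements_py categorize_requirements_py_alt
  have hfold : requirements.foldl (fun categories req =>
      let cat_name := pvCatName req
      let categories := if categories.contains cat_name then categories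
                        else categories.insert cat_name []
      categories.modify cat_name [] (fun l => l ++ [req])) PySem.Dict.empty
      = (requirements.map (fun r => (pvCatName r, r))).foldl
          (fun d p => d.modify p.1 [] (fun l => l ++ [p.2])) PySem.Dict.empty := by
    rw [List.foldl_map]
    refine (PySem.List.foldl_congr_mem _ _ _ _ ?_).symm
    intro d r _
    exact (stepA_eq d (pvCatName r) r).symm
  rw [hfold]
  have hnd : (((requirements.map (fun r => (pvCatName r, r))).foldl
      (fun d p => d.modify p.1 [] (fun l => l ++ [p.2])) PySem.Dict.empty)).keys.Nodup :=
    PySem.Dict.nodup_keys_foldl_modify_key (requirements.map (fun r => (pvCatName r, r)))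
      (fun p => p.1) [] (fun d p l => l ++ [p.2]) PySem.Dict.empty (by simp)
  rw [PySem.Dict.items_eq_map_keys _ hnd []]
  have hkeys : ((requirements.map (fun r => (pvCatName r, r))).foldl
      (fun d p => d.modify p.1 [] (fun l => l ++ [p.2])) PySem.Dict.empty).keys
      = PySem.List.dedup (requirements.map pvCatName) := by
    rw [PySem.Dict.keys_foldl_modify_key]
    simp [List.map_map, Function.comp_def, PySem.Set.update_nil_left]
  rw [hkeys]
  apply List.map_congr_left
  intro k _
  rw [PySem.Dict.getD_foldl_modify_append, zip_filter_eq]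
  simp
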